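-- pv_equiv track=rewrite | github.com/MrHamdulay/csc3-capstone | examples/data/Assignment_4/schdan037/piglatin.py | toEnglish_word
-- ===== SOURCE A (Python) =====
-- def toEnglish_word(s):
--     final = ""
--     starts_vowel = False
--     no_vowel = True
--     consonant = ""
--     for i in s:
--         if i == "w":
--             starts_vowel = True
--     if starts_vowel:
--         final = s[:-3]
--     else:
--         s = s[:-2]
--         for l in s[::-1]:
--             for vowel in "aeiou":
--                 if l == vowel:
--                     no_vowel = False
--             if no_vowel:
--                 consonant += l
--         consonant = consonant[::-1]
--         final = consonant + s[:len(consonant)*(-1)-1]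
--     return final
-- ===== SOURCE B (Python) =====
-- def toEnglish_word(s):
--     if "w" in s:
--         return s[:-3]
--     s2 = s[:-2]
--     i = len(s2)
--     while i > 0 and s2[i-1] not in "aeiou":
--         i -= 1
--     consonant = s2[i:]
--     return consonant + s2[:-len(consonant)-1]
-- ===== Notes on version B (the rewrite author's own statement) =====
-- stated objective: simpler
-- what changed: B finds the split point with a backwards index scan that stops at the first vowel and takes one slice, instead of A's full reversed scan with a sticky no-vowel flag, character-by-character string accumulation and a 5-way inner vowel loop.
import Mathlib
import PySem

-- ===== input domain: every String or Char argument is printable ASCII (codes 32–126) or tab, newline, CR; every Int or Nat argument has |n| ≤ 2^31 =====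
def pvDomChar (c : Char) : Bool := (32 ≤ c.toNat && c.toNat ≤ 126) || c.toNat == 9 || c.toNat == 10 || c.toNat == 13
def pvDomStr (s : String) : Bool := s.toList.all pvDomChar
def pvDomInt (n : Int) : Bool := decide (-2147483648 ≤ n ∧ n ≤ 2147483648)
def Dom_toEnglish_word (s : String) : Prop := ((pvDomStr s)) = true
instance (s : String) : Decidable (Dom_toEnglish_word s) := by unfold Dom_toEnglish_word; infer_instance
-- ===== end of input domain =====

-- B replaces A's sticky-flag reversed-scan accumulation by a direct backwards index scan for the
-- last vowel followed by one slice (objective: simpler). Return-value equivalence only.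

-- ===== PORT A =====
-- the body of A's 'for l in s[::-1]' loop: state (no_vowel, consonant);
-- the inner 'for vowel in "aeiou"' is the fold over "aeiou".toList
def aStep (st : Bool × List Char) (l : Char) : Bool × List Char :=
  let nv := "aeiou".toList.foldl (fun nv vowel => if l = vowel then false else nv) st.1
  (nv, if nv then st.2 ++ [l] else st.2)

-- 's[::-1]' is list reverse (PySem.List.slice?_none_none_neg_one)
def toEnglish_word (s : String) : String :=
  let startsVowel := s.toList.foldl (fun fl i => if i = 'w' then true else fl) false
  if startsVowel then
    String.ofList (PySem.List.slice s.toList none (some (-3)))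
  else
    let s2 := PySem.List.slice s.toList none (some (-2))
    let st := s2.reverse.foldl aStep (true, [])
    let consonant := st.2.reverse
    String.ofList (consonant ++ PySem.List.slice s2 none (some ((consonant.length : Int) * (-1) - 1)))

-- ===== PORT B =====
-- the 'while i > 0 and s2[i-1] not in "aeiou"' loop of Source B, recursing on i
def bLoop (s2 : List Char) : Nat → Nat
  | 0 => 0
  | i + 1 => if (s2[i]?).any (fun c => c ∈ "aeiou".toList) then i + 1 else bLoop s2 i

def toEnglish_word_alt (s : String) : String :=
  if PySem.Str.isIn "w" s then
    String.ofList (PySem.List.slice s.toList none (some (-3)))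
  else
    let s2 := PySem.List.slice s.toList none (some (-2))
    let i := bLoop s2 s2.length
    let consonant := PySem.List.slice s2 (some (i : Int)) none
    String.ofList (consonant ++ PySem.List.slice s2 none (some (-(consonant.length : Int) - 1)))

-- ===== PRECONDITION & SPEC =====
def Spec_toEnglish_word (s : String) (out : String) : Prop := out = toEnglish_word_alt s
instance (s : String) (out : String) : Decidable (Spec_toEnglish_word s out) := by unfold Spec_toEnglish_word; infer_instance

-- ===== CLAIM (what is proved, stated in full; the proofs are below) =====
def Claim_equal_toEnglish_word : Prop := ∀ (s : String), Dom_toEnglish_word s → Spec_toEnglish_word s (toEnglish_word s)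

-- ===== LEMMAS AND PROOFS =====

def isVow (c : Char) : Bool := "aeiou".toList.contains c

theorem isVow_eq (c : Char) : isVow c = decide (c ∈ "aeiou".toList) := by
  simp [isVow]

theorem wflag_eq (l : List Char) (b : Bool) :
    l.foldl (fun fl i => if i = 'w' then true else fl) b = (b || l.any (· = 'w')) := by
  induction l generalizing b with
  | nil => simp
  | cons x xs ih =>
    simp only [List.foldl_cons, List.any_cons, ih]
    by_cases h : x = 'w' <;> simp [h]

theorem inner_eq (l : Char) (b : Bool) (vs : List Char) :
    vs.foldl (fun nv vowel => if l = vowel then false else nv) b = (b && !vs.contains l) := by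
  induction vs generalizing b with
  | nil => simp
  | cons v vs ih =>
    simp only [List.foldl_cons, ih, List.contains_cons]
    by_cases h : l = v
    · simp [h]
    · rw [show (l == v) = false from beq_eq_false_iff_ne.mpr h]
      simp [h]

theorem aStep_eq (st : Bool × List Char) (l : Char) :
    aStep st l = (st.1 && !isVow l, if st.1 && !isVow l then st.2 ++ [l] else st.2) := by
  unfold aStep
  rw [inner_eq]
  simp [isVow]

theorem outer_false (r : List Char) (acc : List Char) :
    r.foldl aStep (false, acc) = (false, acc) := by
  induction r with
  | nil => rfl
  | cons x xs ih => simp only [List.foldl_cons, aStep_eq, Bool.false_and, if_neg, ih,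
      Bool.false_eq_true, not_false_eq_true]

theorem outer_true (r : List Char) (acc : List Char) :
    r.foldl aStep (true, acc) =
      (!r.any isVow, acc ++ r.takeWhile (fun c => !isVow c)) := by
  induction r generalizing acc with
  | nil => simp
  | cons x xs ih =>
    simp only [List.foldl_cons, aStep_eq, Bool.true_and, List.any_cons, List.takeWhile_cons]
    by_cases h : isVow x
    · simp [h, outer_false]
    · simp only [h, Bool.not_false, if_pos, ih, Bool.false_or]
      simp

theorem bLoop_append (s2 : List Char) (c : Char) (i : Nat) (h : i ≤ s2.length) :
    bLoop (s2 ++ [c]) i = bLoop s2 i := by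
  induction i with
  | zero => rfl
  | succ j ih =>
    have hj : j < s2.length := by omega
    simp only [bLoop, List.getElem?_append_left hj, ih (by omega)]

theorem bLoop_le (s2 : List Char) (i : Nat) : bLoop s2 i ≤ i := by
  induction i with
  | zero => exact Nat.le_refl _
  | succ j ih =>
    simp only [bLoop]
    split
    · exact Nat.le_refl _
    · omega

theorem bLoop_drop (s2 : List Char) :
    s2.drop (bLoop s2 s2.length) = (s2.reverse.takeWhile (fun c => !isVow c)).reverse := by
  induction s2 using List.reverseRecOn with
  | nil => rfl
  | append_singleton xs c ih =>
    have hlen : (xs ++ [c]).length = xs.length + 1 := by simp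
    rw [hlen]
    simp only [bLoop, List.getElem?_append_right (Nat.le_refl _), Nat.sub_self,
      List.getElem?_cons_zero, Option.any_some, List.reverse_append, List.reverse_cons,
      List.reverse_nil, List.nil_append, List.singleton_append, List.takeWhile_cons]
    by_cases h : c ∈ "aeiou".toList
    · have hv : isVow c = true := by rw [isVow_eq]; exact decide_eq_true h
      rw [decide_eq_true h, if_pos rfl, hv]
      simp only [Bool.not_true, Bool.false_eq_true, if_false, List.reverse_nil]
      exact List.drop_eq_nil_of_le (by simp)
    · have hv : isVow c = false := by rw [isVow_eq]; exact decide_eq_false h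
      rw [decide_eq_false h, if_neg (by simp), bLoop_append xs c _ (Nat.le_refl _),
        List.drop_append_of_le_length (bLoop_le xs xs.length), ih, hv]
      simp

-- ===== VERDICT (by name: the statement is the Claim_ definition above) =====
theorem toEnglish_word_spec : Claim_equal_toEnglish_word := by
  intro s _
  unfold Spec_toEnglish_word
  have hw : PySem.Str.isIn "w" s = s.toList.any (· = 'w') := by
    rcases h : s.toList.any (· = 'w') with _ | _
    · rw [PySem.Str.isIn_eq, PySem.Chars.isIn_eq_false_iff]
      intro hin
      have hm : 'w' ∈ s.toList := hin.sublist.subset (by decide)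
      rw [List.any_eq_false] at h
      exact absurd (by decide) (h 'w' hm)
    · rw [PySem.Str.isIn_eq, PySem.Chars.isIn_iff_infix]
      rw [List.any_eq_true] at h
      obtain ⟨x, hx, hxw⟩ := h
      have hxw' : x = 'w' := by simpa using hxw
      subst hxw'
      obtain ⟨l1, l2, hsl⟩ := List.append_of_mem hx
      rw [hsl]
      exact ⟨l1, l2, by simp⟩
  by_cases hany : s.toList.any (· = 'w') = true
  · simp only [toEnglish_word, toEnglish_word_alt, wflag_eq, Bool.false_or, hw, hany, if_true]
  · rw [Bool.not_eq_true] at hany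
    simp only [toEnglish_word, toEnglish_word_alt, wflag_eq, Bool.false_or, hw, hany,
      Bool.false_eq_true, if_false]
    rw [outer_true, PySem.List.slice_from_natCast, bLoop_drop]
    simp only [List.nil_append, mul_neg_one]
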